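-- pv_equiv track=rewrite | github.com/ryder7223/GDServerTools | GDLevelInfo.py | count_object_ids
-- ===== SOURCE A (Python) =====
-- from collections import Counter
--
-- def count_object_ids(object_string):
--     objects = object_string.split(';')
--     object_ids = []
--     for obj in objects:
--         if not obj.strip():
--             continue
--         fields = obj.split(',')
--         for i in range(0, len(fields) - 1, 2):
--             if fields[i] == '1':
--                 obj_id = fields[i+1]
--                 # Linked Teleport Portals
--                 if obj_id == '747':
--                     object_ids.append(obj_id)
--                     object_ids.append(obj_id)
--                 # Start Position
--                 elif obj_id == '31':
--                     pass
--                 else: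
--                     object_ids.append(obj_id)
--                 break
--     return Counter(object_ids)
-- ===== SOURCE B (Python) =====
-- from collections import Counter
--
-- def count_object_ids(object_string):
--     counts = Counter()
--     for obj in object_string.split(';'):
--         if not obj.strip():
--             continue
--         fields = obj.split(',')
--         props = {}
--         for i in range(0, len(fields) - 1, 2):
--             props.setdefault(fields[i], fields[i + 1])
--         obj_id = props.get('1')
--         if obj_id is None:
--             continue
--         if obj_id == '747':
--             counts[obj_id] += 2
--         elif obj_id != '31':
--             counts[obj_id] += 1
--     return counts
-- ===== Notes on version B (the rewrite author's own statement) =====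
-- stated objective: alternative
-- what changed: Replaces the scan-until-first-match-then-break inner loop and the final Counter(list) pass by building a first-occurrence dict of field pairs per object, looking up the id property key directly, and updating a Counter incrementally (doubled for linked teleport portals, skipped for start positions, plus one otherwise).
import Mathlib
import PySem

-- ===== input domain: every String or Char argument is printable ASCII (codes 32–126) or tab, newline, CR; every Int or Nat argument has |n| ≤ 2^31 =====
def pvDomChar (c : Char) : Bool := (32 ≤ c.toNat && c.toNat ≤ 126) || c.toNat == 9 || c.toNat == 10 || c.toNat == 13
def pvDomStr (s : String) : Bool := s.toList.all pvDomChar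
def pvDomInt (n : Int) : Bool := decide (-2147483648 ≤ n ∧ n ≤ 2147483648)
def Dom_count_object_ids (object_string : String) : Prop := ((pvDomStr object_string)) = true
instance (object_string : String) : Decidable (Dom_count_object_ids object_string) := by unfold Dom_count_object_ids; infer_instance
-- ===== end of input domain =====

-- B replaces A's break-at-first-'1' scan and final Counter(list) by a first-occurrence
-- field dict per object plus an incrementally updated counter (alternative decomposition, same cost).

-- ===== PORT A =====
-- s.split(sep) for a nonempty literal separator; exact (PySem.Chars.splitOn is the sep ≠ "" form)
def strSplit (s sep : String) : List String := (PySem.Chars.splitOn s.toList sep.toList).map String.ofList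

-- A's inner 'for i in range(0, len-1, 2): … break' loop; indices from the range are
-- always in bounds (0 ≤ i, i+1 < len fields), so pyGetD with a dummy default is exact.
def countObjLoopA (fields : List String) (ids : List String) : List Int → List String
  | [] => ids
  | i :: rest =>
      if PySem.List.pyGetD fields i "" = "1" then
        let obj_id := PySem.List.pyGetD fields (i + 1) ""
        if obj_id = "747" then ids ++ [obj_id, obj_id]
        else if obj_id = "31" then ids
        else ids ++ [obj_id]
      else countObjLoopA fields ids rest

def count_object_ids (object_string : String) : List (String × Int) :=
  let objects := strSplit object_string ";"
  let object_ids := objects.foldl (fun ids obj =>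
    if PySem.Str.strip obj = "" then ids
    else
      let fields := strSplit obj ","
      countObjLoopA fields ids (PySem.List.pyRange 0 ((fields.length : Int) - 1) 2)) []
  (PySem.Dict.counter object_ids).items

-- ===== PORT B =====
def count_object_ids_alt (object_string : String) : List (String × Int) :=
  let counts := (strSplit object_string ";").foldl (fun counts obj =>
    if PySem.Str.strip obj = "" then counts
    else
      let fields := strSplit obj ","
      let props := (PySem.List.pyRange 0 ((fields.length : Int) - 1) 2).foldl
        (fun p i => p.setdefault (PySem.List.pyGetD fields i "")
                                 (PySem.List.pyGetD fields (i + 1) "")) PySem.Dict.empty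
      match props.get? "1" with
      | none => counts
      | some obj_id =>
          if obj_id = "747" then counts.modify obj_id 0 (· + 2)
          else if obj_id = "31" then counts
          else counts.modify obj_id 0 (· + 1)) PySem.Dict.empty
  counts.items

-- ===== PRECONDITION & SPEC =====
def Spec_count_object_ids (object_string : String) (out : List (String × Int)) : Prop := out = count_object_ids_alt object_string
instance (object_string : String) (out : List (String × Int)) : Decidable (Spec_count_object_ids object_string out) := by unfold Spec_count_object_ids; infer_instance

-- ===== CLAIM (what is proved, stated in full; the proofs are below) =====
def Claim_equal_count_object_ids : Prop := ∀ (object_string : String), Dom_count_object_ids object_string → Spec_count_object_ids object_string (count_object_ids object_string)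

-- ===== LEMMAS AND PROOFS =====

-- the value A's break-loop selects: the second field of the first even-position pair keyed '1'
def firstScan (fields : List String) : List Int → Option String
  | [] => none
  | i :: rest =>
      if PySem.List.pyGetD fields i "" = "1" then some (PySem.List.pyGetD fields (i + 1) "")
      else firstScan fields rest

-- B's setdefault-dict lookup of "1" computes firstScan (first occurrence wins)
theorem get?_foldl_setdefault (fields : List String) :
    ∀ (idxs : List Int) (d : PySem.Dict String String),
      (idxs.foldl (fun p i => p.setdefault (PySem.List.pyGetD fields i "")
                                           (PySem.List.pyGetD fields (i + 1) "")) d).get? "1" =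
      (match d.get? "1" with
       | some x => some x
       | none => firstScan fields idxs) := by
  intro idxs
  induction idxs with
  | nil => intro d; simp [firstScan]; cases d.get? "1" <;> rfl
  | cons i rest ih =>
      intro d
      simp only [List.foldl_cons]
      rw [ih]
      by_cases h : PySem.List.pyGetD fields i "" = "1"
      · rw [h, PySem.Dict.get?_setdefault_self]
        cases hd : d.get? "1" <;> simp [firstScan, h]
      · rw [PySem.Dict.get?_setdefault_of_ne _ _ (fun he => h he.symm)]
        cases hd : d.get? "1" <;> simp [firstScan, h]

-- A's break-loop in terms of firstScan
theorem countObjLoopA_eq (fields : List String) :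
    ∀ (idxs : List Int) (ids : List String),
      countObjLoopA fields ids idxs =
      (match firstScan fields idxs with
       | none => ids
       | some obj_id =>
           if obj_id = "747" then ids ++ [obj_id, obj_id]
           else if obj_id = "31" then ids
           else ids ++ [obj_id]) := by
  intro idxs
  induction idxs with
  | nil => intro ids; rfl
  | cons i rest ih =>
      intro ids
      by_cases h : PySem.List.pyGetD fields i "" = "1" <;>
        simp [countObjLoopA, firstScan, h, ih]

-- merging two +1 counter updates into one +2 update
theorem modify_add_add (d : PySem.Dict String Int) (k : String) :
    (d.modify k 0 (· + 1)).modify k 0 (· + 1) = d.modify k 0 (· + 2) := by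
  simp [PySem.Dict.modify, PySem.Dict.getD_insert_self, PySem.Dict.insert_insert_self]
  congr 1
  omega

-- one object step: updating the counter incrementally = counting the appended ids
theorem step_eq (ids : List String) (obj : String) :
    PySem.Dict.counter
      (if PySem.Str.strip obj = "" then ids
       else countObjLoopA (strSplit obj ",") ids
              (PySem.List.pyRange 0 (((strSplit obj ",").length : Int) - 1) 2)) =
    (if PySem.Str.strip obj = "" then PySem.Dict.counter ids
     else
       match ((PySem.List.pyRange 0 (((strSplit obj ",").length : Int) - 1) 2).foldl
               (fun p i => p.setdefault (PySem.List.pyGetD (strSplit obj ",") i "")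
                                        (PySem.List.pyGetD (strSplit obj ",") (i + 1) ""))
               PySem.Dict.empty).get? "1" with
       | none => PySem.Dict.counter ids
       | some obj_id =>
           if obj_id = "747" then (PySem.Dict.counter ids).modify obj_id 0 (· + 2)
           else if obj_id = "31" then PySem.Dict.counter ids
           else (PySem.Dict.counter ids).modify obj_id 0 (· + 1)) := by
  by_cases hs : PySem.Str.strip obj = ""
  · simp [hs]
  · simp only [hs, if_false]
    rw [get?_foldl_setdefault, countObjLoopA_eq]
    have hempty : (PySem.Dict.empty : PySem.Dict String String).get? "1" = none := rfl
    rw [hempty]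
    cases hf : firstScan (strSplit obj ",")
        (PySem.List.pyRange 0 (((strSplit obj ",").length : Int) - 1) 2) with
    | none => simp
    | some obj_id =>
        by_cases h747 : obj_id = "747"
        · subst h747
          show PySem.Dict.counter (ids ++ ["747", "747"]) =
               (PySem.Dict.counter ids).modify "747" 0 (· + 2)
          rw [show ids ++ ["747", "747"] = (ids ++ ["747"]) ++ ["747"] from by simp,
              PySem.Dict.counter_append_singleton, PySem.Dict.counter_append_singleton,
              modify_add_add]
        · by_cases h31 : obj_id = "31" <;>
            simp [h747, h31, PySem.Dict.counter_append_singleton]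

-- whole fold: counter of A's accumulated list = B's incrementally built counter
theorem fold_eq :
    ∀ (objects : List String) (ids : List String),
      PySem.Dict.counter
        (objects.foldl (fun ids obj =>
          if PySem.Str.strip obj = "" then ids
          else countObjLoopA (strSplit obj ",") ids
                 (PySem.List.pyRange 0 (((strSplit obj ",").length : Int) - 1) 2)) ids) =
      objects.foldl (fun counts obj =>
          if PySem.Str.strip obj = "" then counts
          else
            match ((PySem.List.pyRange 0 (((strSplit obj ",").length : Int) - 1) 2).foldl
                    (fun p i => p.setdefault (PySem.List.pyGetD (strSplit obj ",") i "")
                                             (PySem.List.pyGetD (strSplit obj ",") (i + 1) ""))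
                    PySem.Dict.empty).get? "1" with
            | none => counts
            | some obj_id =>
                if obj_id = "747" then counts.modify obj_id 0 (· + 2)
                else if obj_id = "31" then counts
                else counts.modify obj_id 0 (· + 1)) (PySem.Dict.counter ids) := by
  intro objects
  induction objects with
  | nil => intro ids; rfl
  | cons obj rest ih =>
      intro ids
      simp only [List.foldl_cons]
      rw [ih]
      congr 1
      exact step_eq ids obj

-- ===== VERDICT (by name: the statement is the Claim_ definition above) =====
theorem count_object_ids_spec : Claim_equal_count_object_ids := by
  intro s _
  unfold Spec_count_object_ids
  exact congrArg PySem.Dict.items (fold_eq (strSplit s ";") [])
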